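-- pv_equiv track=rewrite | github.com/spine-tools/Spine-Database-API | spinedb_api/compat/converters.py | _normalise_delta
-- ===== SOURCE A (Python) =====
-- def _normalise_delta(years=0, months=0, days=0, hours=0, minutes=0, seconds=0, microseconds=0, nanoseconds=0) -> dict:
--     microseconds += nanoseconds // 1_000
--
--     seconds += microseconds // 1_000_000
--
--     minutes += seconds // 60
--     seconds = seconds % 60
--
--     hours += minutes // 60
--     minutes = minutes % 60
--
--     days += hours // 24
--     hours = hours % 24
--
--     years += months // 12
--     months = months % 12
--
--     units = ("years", "months", "days", "hours", "minutes", "seconds")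
--     values = (years, months, days, hours, minutes, seconds)
--     res = {unit: value for unit, value in zip(units, values) if value > 0}
--     return res
-- ===== SOURCE B (Python) =====
-- def _normalise_delta(years=0, months=0, days=0, hours=0, minutes=0, seconds=0, microseconds=0, nanoseconds=0) -> dict:
--     # Table-driven closed form: each output field is read off independently from
--     # two flat totals (microseconds and months) via its period and wrap modulus,
--     # instead of propagating carries unit by unit.
--     total_us = nanoseconds // 1_000 + microseconds + 1_000_000 * (
--         seconds + 60 * (minutes + 60 * (hours + 24 * days))
--     )
--     total_months = 12 * years + months
--     table = (
--         ("years", total_months, 12, None),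
--         ("months", total_months, 1, 12),
--         ("days", total_us, 86_400_000_000, None),
--         ("hours", total_us, 3_600_000_000, 24),
--         ("minutes", total_us, 60_000_000, 60),
--         ("seconds", total_us, 1_000_000, 60),
--     )
--     res = {}
--     for unit, total, period, wrap in table:
--         value = total // period
--         if wrap is not None:
--             value %= wrap
--         if value > 0:
--             res[unit] = value
--     return res
-- ===== Notes on version B (the rewrite author's own statement) =====
-- stated objective: alternative
-- what changed: A cascades carries unit by unit, mutating each field in sequence; B computes two flat totals (microseconds and months) and reads every output field independently off them via a data-driven table of (unit, total, period, wrap) entries in one generic loop, with no carry propagation between fields.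
import Mathlib
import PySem

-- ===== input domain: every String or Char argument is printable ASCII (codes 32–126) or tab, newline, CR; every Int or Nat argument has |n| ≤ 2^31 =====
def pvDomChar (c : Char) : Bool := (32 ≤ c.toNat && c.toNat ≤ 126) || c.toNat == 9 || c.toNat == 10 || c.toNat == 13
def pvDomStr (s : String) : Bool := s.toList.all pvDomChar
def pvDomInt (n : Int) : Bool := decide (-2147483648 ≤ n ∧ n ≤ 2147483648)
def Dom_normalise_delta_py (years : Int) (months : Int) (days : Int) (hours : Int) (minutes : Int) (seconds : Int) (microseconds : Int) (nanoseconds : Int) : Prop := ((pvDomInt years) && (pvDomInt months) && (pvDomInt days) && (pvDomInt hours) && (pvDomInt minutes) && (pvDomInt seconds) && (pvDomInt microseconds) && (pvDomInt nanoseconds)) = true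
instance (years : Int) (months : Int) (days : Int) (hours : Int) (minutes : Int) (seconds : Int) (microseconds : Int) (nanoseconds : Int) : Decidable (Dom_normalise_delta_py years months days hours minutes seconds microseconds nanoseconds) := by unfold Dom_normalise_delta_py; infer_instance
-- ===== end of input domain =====

-- ===== PORT A =====
-- B replaces A's cascade of unit-by-unit carry steps by a table-driven loop that
-- reads each field independently off two flat totals (objective: alternative).
def normalise_delta_py (years : Int) (months : Int) (days : Int) (hours : Int) (minutes : Int) (seconds : Int) (microseconds : Int) (nanoseconds : Int) : List (String × Int) :=
  let microseconds := microseconds + PySem.Int.floordiv nanoseconds 1000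
  let seconds := seconds + PySem.Int.floordiv microseconds 1000000
  let minutes := minutes + PySem.Int.floordiv seconds 60
  let seconds := PySem.Int.mod seconds 60
  let hours := hours + PySem.Int.floordiv minutes 60
  let minutes := PySem.Int.mod minutes 60
  let days := days + PySem.Int.floordiv hours 24
  let hours := PySem.Int.mod hours 24
  let years := years + PySem.Int.floordiv months 12
  let months := PySem.Int.mod months 12
  -- dict comprehension over zip(units, values) with distinct literal keys:
  -- the resulting dict, as an insertion-order association list, is this filter
  (List.zip ["years", "months", "days", "hours", "minutes", "seconds"]
            [years, months, days, hours, minutes, seconds]).filter (fun uv => uv.2 > 0)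

-- ===== PORT B =====
def normalise_delta_py_alt (years : Int) (months : Int) (days : Int) (hours : Int) (minutes : Int) (seconds : Int) (microseconds : Int) (nanoseconds : Int) : List (String × Int) :=
  let total_us := PySem.Int.floordiv nanoseconds 1000 + microseconds
      + 1000000 * (seconds + 60 * (minutes + 60 * (hours + 24 * days)))
  let total_months := 12 * years + months
  let table : List (String × Int × Int × Option Int) :=
    [("years", total_months, 12, none),
     ("months", total_months, 1, some 12),
     ("days", total_us, 86400000000, none),
     ("hours", total_us, 3600000000, some 24),
     ("minutes", total_us, 60000000, some 60),
     ("seconds", total_us, 1000000, some 60)]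
  (table.foldl (fun res row =>
      let value := PySem.Int.floordiv row.2.1 row.2.2.1
      let value := match row.2.2.2 with
        | some w => PySem.Int.mod value w
        | none => value
      if value > 0 then res.insert row.1 value else res)
    (PySem.Dict.empty : PySem.Dict String Int)).items

-- ===== PRECONDITION & SPEC =====
def Spec_normalise_delta_py (years : Int) (months : Int) (days : Int) (hours : Int) (minutes : Int) (seconds : Int) (microseconds : Int) (nanoseconds : Int) (out : List (String × Int)) : Prop := out = normalise_delta_py_alt years months days hours minutes seconds microseconds nanoseconds
instance (years : Int) (months : Int) (days : Int) (hours : Int) (minutes : Int) (seconds : Int) (microseconds : Int) (nanoseconds : Int) (out : List (String × Int)) : Decidable (Spec_normalise_delta_py years months days hours minutes seconds microseconds nanoseconds out) := by unfold Spec_normalise_delta_py; infer_instance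

-- ===== CLAIM (what is proved, stated in full; the proofs are below) =====
def Claim_equal_normalise_delta_py : Prop := ∀ (years : Int) (months : Int) (days : Int) (hours : Int) (minutes : Int) (seconds : Int) (microseconds : Int) (nanoseconds : Int), Dom_normalise_delta_py years months days hours minutes seconds microseconds nanoseconds → Spec_normalise_delta_py years months days hours minutes seconds microseconds nanoseconds (normalise_delta_py years months days hours minutes seconds microseconds nanoseconds)

-- ===== LEMMAS AND PROOFS =====
-- B reads each field off a flat total by one floor division and one wrap; since
-- floor division by positive constants composes, each of B's six values equals
-- the corresponding carried value of A (the six 'have's, by omega), after which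
-- both sides filter/insert the same six (unit, value) pairs in the same order.
theorem normalise_delta_py_eq_alt (years months days hours minutes seconds microseconds nanoseconds : Int) :
    normalise_delta_py years months days hours minutes seconds microseconds nanoseconds
      = normalise_delta_py_alt years months days hours minutes seconds microseconds nanoseconds := by
  have fd : ∀ (a b : Int), 0 < b → PySem.Int.floordiv a b = a / b :=
    fun a b hb => PySem.Int.floordiv_eq_ediv_of_pos hb
  have md : ∀ (a b : Int), 0 < b → PySem.Int.mod a b = a % b :=
    fun a b hb => PySem.Int.mod_eq_emod_of_pos hb
  simp only [normalise_delta_py, normalise_delta_py_alt, List.foldl, List.zip, List.zipWith,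
    List.filter, fd _ 1000 (by norm_num), fd _ 1000000 (by norm_num), fd _ 60 (by norm_num),
    fd _ 24 (by norm_num), fd _ 12 (by norm_num), fd _ 1 (by norm_num),
    fd _ 86400000000 (by norm_num), fd _ 3600000000 (by norm_num), fd _ 60000000 (by norm_num),
    md _ 60 (by norm_num), md _ 24 (by norm_num), md _ 12 (by norm_num)]
  have hy : (12 * years + months) / 12 = years + months / 12 := by omega
  have hmo : ((12 * years + months) / 1) % 12 = months % 12 := by omega
  have hs : (nanoseconds / 1000 + microseconds
      + 1000000 * (seconds + 60 * (minutes + 60 * (hours + 24 * days)))) / 1000000 % 60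
      = (seconds + (microseconds + nanoseconds / 1000) / 1000000) % 60 := by omega
  have hmi : (nanoseconds / 1000 + microseconds
      + 1000000 * (seconds + 60 * (minutes + 60 * (hours + 24 * days)))) / 60000000 % 60
      = (minutes + (seconds + (microseconds + nanoseconds / 1000) / 1000000) / 60) % 60 := by omega
  have hh : (nanoseconds / 1000 + microseconds
      + 1000000 * (seconds + 60 * (minutes + 60 * (hours + 24 * days)))) / 3600000000 % 24
      = (hours + (minutes + (seconds + (microseconds + nanoseconds / 1000) / 1000000) / 60) / 60) % 24 := by omega
  have hd : (nanoseconds / 1000 + microseconds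
      + 1000000 * (seconds + 60 * (minutes + 60 * (hours + 24 * days)))) / 86400000000
      = days + (hours + (minutes + (seconds + (microseconds + nanoseconds / 1000) / 1000000) / 60) / 60) / 24 := by omega
  rw [hy, hmo, hs, hmi, hh, hd]
  by_cases h1 : years + months / 12 > 0 <;>
  by_cases h2 : months % 12 > 0 <;>
  by_cases h3 : days + (hours + (minutes + (seconds + (microseconds + nanoseconds / 1000) / 1000000) / 60) / 60) / 24 > 0 <;>
  by_cases h4 : (hours + (minutes + (seconds + (microseconds + nanoseconds / 1000) / 1000000) / 60) / 60) % 24 > 0 <;>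
  by_cases h5 : (minutes + (seconds + (microseconds + nanoseconds / 1000) / 1000000) / 60) % 60 > 0 <;>
  by_cases h6 : (seconds + (microseconds + nanoseconds / 1000) / 1000000) % 60 > 0 <;>
  simp [h1, h2, h3, h4, h5, h6, PySem.Dict.insert, PySem.Dict.empty,
    PySem.Dict.contains]

-- ===== VERDICT (by name: the statement is the Claim_ definition above) =====
theorem normalise_delta_py_spec : Claim_equal_normalise_delta_py := by
  intro years months days hours minutes seconds microseconds nanoseconds _
  exact normalise_delta_py_eq_alt years months days hours minutes seconds microseconds nanoseconds
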